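-- pv_equiv track=rewrite | github.com/Li-ionFractalNanocore/Leetcode | exercise/prefix/2025/1.py | waysToPartition
-- ===== SOURCE A (Python) =====
-- from itertools import accumulate
-- from collections import defaultdict
-- from typing import List
--
-- def waysToPartition(nums: List[int], k: int) -> int:
--     n = len(nums)
--     prefix_sum = list(accumulate(nums))
--     sum_nums = prefix_sum[-1]
--     right_counter = defaultdict(int)
--     for i in range(n - 1):
--         right_counter[prefix_sum[i]] += 1
--
--     result = 0
--     if sum_nums % 2 == 0:
--         result = right_counter[sum_nums // 2]
--
--     left_counter = defaultdict(int)
--     for i, num in enumerate(nums):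
--         delta = k - num
--         if (sum_nums + delta) % 2 == 0:
--             result = max(result, left_counter[(sum_nums + delta) // 2] + right_counter[(sum_nums - delta) // 2])
--         left_counter[prefix_sum[i]] += 1
--         right_counter[prefix_sum[i]] -= 1
--     return result
-- ===== SOURCE B (Python) =====
-- from collections import defaultdict
-- from bisect import bisect_left
-- from typing import List
--
-- def waysToPartition(nums: List[int], k: int) -> int:
--     n = len(nums)
--     prefix = []
--     s = 0
--     for x in nums:
--         s += x
--         prefix.append(s)
--     total = s
--     pos = defaultdict(list)
--     for i in range(n - 1):
--         pos[prefix[i]].append(i)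
--     best = len(pos[total // 2]) if total % 2 == 0 else 0
--     for j, num in enumerate(nums):
--         delta = k - num
--         if (total + delta) % 2 == 0:
--             left_list = pos[(total + delta) // 2]
--             right_list = pos[(total - delta) // 2]
--             split = bisect_left(right_list, j)
--             best = max(best, bisect_left(left_list, j) + len(right_list) - split)
--     return best
-- ===== Notes on version B (the rewrite author's own statement) =====
-- stated objective: alternative
-- what changed: Replaces A's sweep with two mutating counters by a static index (dict from prefix-sum value to its sorted list of pivot positions) queried with bisect: the baseline is the length of one positions list and each candidate is counted by binary-searching the split point j in two positions lists, so the loop keeps no evolving state except the running max.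
import Mathlib
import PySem

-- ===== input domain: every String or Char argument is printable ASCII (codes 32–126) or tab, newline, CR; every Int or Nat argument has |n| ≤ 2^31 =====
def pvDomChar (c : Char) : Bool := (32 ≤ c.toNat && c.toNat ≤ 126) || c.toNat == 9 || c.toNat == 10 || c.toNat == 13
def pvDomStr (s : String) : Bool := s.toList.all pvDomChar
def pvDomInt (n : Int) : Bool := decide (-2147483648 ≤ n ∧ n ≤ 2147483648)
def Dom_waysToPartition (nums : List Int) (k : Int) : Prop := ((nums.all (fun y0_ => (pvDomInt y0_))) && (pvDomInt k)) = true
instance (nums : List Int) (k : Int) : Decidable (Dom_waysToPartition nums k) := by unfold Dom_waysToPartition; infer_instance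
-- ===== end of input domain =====

-- B replaces A's sweep with two mutating counter dicts by a static dict from prefix-sum value to its
-- sorted list of pivot positions, queried with bisect_left at each split point (alternative
-- decomposition, same return values on every nums ≠ []; on nums = [] A raises IndexError).

-- ===== PORT A =====
-- itertools.accumulate(nums): running prefix sums (pair state: built list, running sum)
def pyAccumulate (xs : List Int) : List Int :=
  (xs.foldl (fun (p : List Int × Int) x => (p.1 ++ [p.2 + x], p.2 + x)) ([], 0)).1

def waysToPartition (nums : List Int) (k : Int) : Int :=
  let n : Int := PySem.List.len nums
  let prefix_sum : List Int := pyAccumulate nums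
  match PySem.List.pyGet? prefix_sum (-1) with
  | none => 0  -- Python raises IndexError here (nums = []); excluded by Pre_
  | some sum_nums =>
    let right_counter : PySem.Dict Int Int :=
      (PySem.List.pyRange 0 (n - 1) 1).foldl
        (fun d i =>
          d.insert (PySem.List.pyGetD prefix_sum i 0) (d.getD (PySem.List.pyGetD prefix_sum i 0) 0 + 1))
        PySem.Dict.empty
    let result : Int :=
      if PySem.Int.mod sum_nums 2 == 0 then right_counter.getD (PySem.Int.floordiv sum_nums 2) 0 else 0
    let final :=
      (PySem.List.enumerate nums 0).foldl
        (fun (st : PySem.Dict Int Int × PySem.Dict Int Int × Int) p =>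
          let delta := k - p.2
          let r :=
            if PySem.Int.mod (sum_nums + delta) 2 == 0 then
              max st.2.2 (st.1.getD (PySem.Int.floordiv (sum_nums + delta) 2) 0 +
                          st.2.1.getD (PySem.Int.floordiv (sum_nums - delta) 2) 0)
            else st.2.2
          let v := PySem.List.pyGetD prefix_sum p.1 0
          (st.1.insert v (st.1.getD v 0 + 1), st.2.1.insert v (st.2.1.getD v 0 - 1), r))
        (PySem.Dict.empty, right_counter, result)
    final.2.2

-- ===== PORT B =====
def waysToPartition_alt (nums : List Int) (k : Int) : Int :=
  let n : Int := PySem.List.len nums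
  let acc := nums.foldl (fun (p : List Int × Int) x => (p.1 ++ [p.2 + x], p.2 + x)) ([], 0)
  let pfx : List Int := acc.1
  let total : Int := acc.2
  let pos : PySem.Dict Int (List Int) :=
    (PySem.List.pyRange 0 (n - 1) 1).foldl
      (fun d i => d.modify (PySem.List.pyGetD pfx i 0) [] (fun l => l ++ [i]))
      PySem.Dict.empty
  let best : Int :=
    if PySem.Int.mod total 2 == 0 then ((pos.getD (PySem.Int.floordiv total 2) []).length : Int) else 0
  (PySem.List.enumerate nums 0).foldl
    (fun (best : Int) p =>
      let delta := k - p.2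
      if PySem.Int.mod (total + delta) 2 == 0 then
        let left_list := pos.getD (PySem.Int.floordiv (total + delta) 2) []
        let right_list := pos.getD (PySem.Int.floordiv (total - delta) 2) []
        let split : Int := (PySem.List.bisectLeft right_list p.1 : Int)
        max best ((PySem.List.bisectLeft left_list p.1 : Int) + (right_list.length : Int) - split)
      else best)
    best

-- ===== PRECONDITION & SPEC =====
-- Pre_ excludes only nums = [], on which A raises IndexError (prefix_sum[-1] of the empty list).
def Pre_waysToPartition (nums : List Int) (k : Int) : Prop := nums ≠ []
instance (nums : List Int) (k : Int) : Decidable (Pre_waysToPartition nums k) := by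
  unfold Pre_waysToPartition; infer_instance
def pvWitness_waysToPartition : List Int × Int := ([1, 1, 2], 2)

def Spec_waysToPartition (nums : List Int) (k : Int) (out : Int) : Prop := out = waysToPartition_alt nums k
instance (nums : List Int) (k : Int) (out : Int) : Decidable (Spec_waysToPartition nums k out) := by
  unfold Spec_waysToPartition; infer_instance

-- ===== CLAIM (what is proved, stated in full; the proofs are below) =====
def Claim_equal_waysToPartition : Prop := ∀ (nums : List Int) (k : Int), Dom_waysToPartition nums k → Pre_waysToPartition nums k → Spec_waysToPartition nums k (waysToPartition nums k)

-- ===== LEMMAS AND PROOFS =====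

-- number of pivot positions i < m with i < j and prefix[i] = x (A's left_counter at step j)
def cntF (P : List Int) (m j : Nat) (x : Int) : Int :=
  ((List.range m).countP (fun i => decide (i < j) && (P.getD i 0 == x)) : Nat)

-- number of pivot positions i < m with j ≤ i and prefix[i] = x (A's right_counter at step j)
def cntG (P : List Int) (m j : Nat) (x : Int) : Int :=
  ((List.range m).countP (fun i => decide (j ≤ i) && (P.getD i 0 == x)) : Nat)

-- B's positions list for prefix-sum value x: the pivot indices 0 ≤ i < m with prefix[i] = x, increasing
def posL (P : List Int) (m : Nat) (x : Int) : List Int :=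
  ((List.range m).map (fun (i : Nat) => (i : Int))).filter (fun i => PySem.List.pyGetD P i 0 == x)

lemma acc_last : ∀ (xs : List Int) (l : List Int) (s : Int), xs ≠ [] →
    (xs.foldl (fun (p : List Int × Int) x => (p.1 ++ [p.2 + x], p.2 + x)) (l, s)).1.getLast?
      = some (xs.foldl (fun (p : List Int × Int) x => (p.1 ++ [p.2 + x], p.2 + x)) (l, s)).2 := by
  intro xs
  induction xs with
  | nil => intro l s h; exact absurd rfl h
  | cons x xs ih =>
    intro l s _
    cases xs with
    | nil => simp [List.foldl]
    | cons y ys => simpa using ih (l ++ [s + x]) (s + x) (by simp)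

lemma pos_getD (f : Int → Int) : ∀ (is : List Int) (d : PySem.Dict Int (List Int)) (x : Int),
    (is.foldl (fun d i => d.modify (f i) [] (fun l => l ++ [i])) d).getD x []
      = d.getD x [] ++ is.filter (fun i => f i == x) := by
  intro is
  induction is with
  | nil => simp
  | cons i is ih =>
    intro d x
    rw [List.foldl_cons, ih, List.filter_cons]
    by_cases h : f i = x
    · simp [h]
    · simp [PySem.Dict.getD_modify, h, Ne.symm h]

lemma countP_split (j : Nat) : ∀ (l : List Nat) (c : Nat → Bool),
    l.countP (fun i => decide (i < j) && c i) + l.countP (fun i => decide (j ≤ i) && c i)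
      = l.countP c := by
  intro l c
  induction l with
  | nil => simp
  | cons i l ih =>
    by_cases h : i < j
    · simp [List.countP_cons, h, Nat.not_le.mpr h]; omega
    · simp [List.countP_cons, h, Nat.le_of_not_lt h]; omega

lemma countP_range_lt (j m : Nat) (p : Nat → Bool) (hj : j ≤ m) :
    (List.range m).countP (fun i => decide (i < j) && p i) = (List.range j).countP p := by
  have h : m = j + (m - j) := by omega
  rw [h, List.range_add, List.countP_append]
  have h1 : (List.range j).countP (fun i => decide (i < j) && p i) = (List.range j).countP p := by
    apply List.countP_congr
    intro i hi
    simp [List.mem_range.mp hi]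
  have h2 : ((List.range (m - j)).map (fun x => j + x)).countP (fun i => decide (i < j) && p i) = 0 := by
    rw [List.countP_map]
    apply List.countP_eq_zero.mpr
    intro i _
    simp
  omega

lemma countP_range_ge_succ (j m : Nat) (c : Nat → Bool) (hj : j < m) :
    (List.range m).countP (fun i => decide (j ≤ i) && c i)
      = (if c j then 1 else 0) + (List.range m).countP (fun i => decide (j + 1 ≤ i) && c i) := by
  have hm : m = (j + 1) + (m - (j + 1)) := by omega
  rw [hm, List.range_add, List.range_succ, List.countP_append, List.countP_append,
    List.countP_append, List.countP_append, List.countP_map, List.countP_map]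
  have z1 : (List.range j).countP (fun i => decide (j ≤ i) && c i) = 0 := by
    apply List.countP_eq_zero.mpr; intro i hi
    have hlt := List.mem_range.mp hi
    simp only [Bool.and_eq_true, decide_eq_true_eq]
    exact fun h => absurd h.1 (by omega)
  have z2 : (List.range j).countP (fun i => decide (j + 1 ≤ i) && c i) = 0 := by
    apply List.countP_eq_zero.mpr; intro i hi
    have hlt := List.mem_range.mp hi
    simp only [Bool.and_eq_true, decide_eq_true_eq]
    exact fun h => absurd h.1 (by omega)
  have e1 : (List.range (m - (j + 1))).countP ((fun i => decide (j ≤ i) && c i) ∘ (fun x => j + 1 + x))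
      = (List.range (m - (j + 1))).countP ((fun i => decide (j + 1 ≤ i) && c i) ∘ (fun x => j + 1 + x)) := by
    apply List.countP_congr; intro i _
    simp [Function.comp, (by omega : j ≤ j + 1 + i), (by omega : j + 1 ≤ j + 1 + i)]
  rw [e1, z1, z2]
  by_cases h : c j <;> simp [h]

lemma cntF_succ (P : List Int) (m j : Nat) (x : Int) (hj : j < m) :
    cntF P m (j + 1) x = cntF P m j x + (if P.getD j 0 = x then 1 else 0) := by
  unfold cntF
  rw [countP_range_lt (j+1) m _ (by omega), countP_range_lt j m _ (by omega), List.range_succ,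
    List.countP_append]
  by_cases h : P.getD j 0 = x <;> simp [h]

lemma cntG_succ (P : List Int) (m j : Nat) (x : Int) (hj : j < m) :
    cntG P m (j + 1) x = cntG P m j x - (if P.getD j 0 = x then 1 else 0) := by
  unfold cntG
  rw [countP_range_ge_succ j m _ hj]
  by_cases h : P.getD j 0 = x
  · rw [if_pos h, if_pos (by simpa using h)]; push_cast; ring
  · rw [if_neg h, if_neg (by simpa using h)]; push_cast; ring

lemma bisectLeft_eq_countP (l : List Int) (v : Int) (h : l.Pairwise (· ≤ ·)) :
    PySem.List.bisectLeft l v = l.countP (fun y => decide (y < v)) := by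
  obtain ⟨hle, hlt, hge⟩ := PySem.List.bisectLeft_spec l v h
  set b := PySem.List.bisectLeft l v with hb
  have hsplit : l = l.take b ++ l.drop b := (List.take_append_drop b l).symm
  rw [hsplit, List.countP_append]
  have h1 : (l.take b).countP (fun y => decide (y < v)) = b := by
    have : ∀ y ∈ l.take b, (fun y => decide (y < v)) y = true := by
      intro y hy
      obtain ⟨i, hi, rfl⟩ := List.mem_iff_getElem.mp hy
      have hib : i < b := by rw [List.length_take] at hi; omega
      rw [List.getElem_take]
      simpa using hlt i (by omega) hib
    rw [List.countP_eq_length.mpr this, List.length_take]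
    omega
  have h2 : (l.drop b).countP (fun y => decide (y < v)) = 0 := by
    apply List.countP_eq_zero.mpr
    intro y hy
    obtain ⟨i, hi, rfl⟩ := List.mem_iff_getElem.mp hy
    rw [List.getElem_drop]
    have hbl : b + i < l.length := by rw [List.length_drop] at hi; omega
    have := hge (b + i) hbl (by omega)
    simpa using not_lt.mpr this
  omega

lemma posL_sorted (P : List Int) (m : Nat) (x : Int) : (posL P m x).Pairwise (· ≤ ·) := by
  apply List.Pairwise.filter
  refine List.pairwise_map.mpr (List.Pairwise.imp ?_ List.pairwise_lt_range)
  intro a b h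
  exact_mod_cast Nat.le_of_lt h

lemma posL_countP_lt (P : List Int) (m j : Nat) (x : Int) :
    ((posL P m x).countP (fun y => decide (y < (j : Int))) : Int) = cntF P m j x := by
  unfold posL cntF
  rw [List.countP_filter, List.countP_map]
  exact congrArg Nat.cast (List.countP_congr (fun i _ => by simp))

lemma posL_len (P : List Int) (m : Nat) (x : Int) :
    (posL P m x).length = (List.range m).countP (fun i => P.getD i 0 == x) := by
  unfold posL
  rw [← List.countP_eq_length_filter, List.countP_map]
  exact List.countP_congr (fun i _ => by simp)

lemma posL_length (P : List Int) (m j : Nat) (x : Int) :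
    ((posL P m x).length : Int) - ((posL P m x).countP (fun y => decide (y < (j : Int))) : Int)
      = cntG P m j x := by
  rw [posL_countP_lt, posL_len]
  have h3 := countP_split j (List.range m) (fun i => P.getD i 0 == x)
  unfold cntF cntG at *
  omega

lemma bisect_cntF (P : List Int) (m j : Nat) (x : Int) :
    ((PySem.List.bisectLeft (posL P m x) (j : Int) : Nat) : Int) = cntF P m j x := by
  rw [bisectLeft_eq_countP _ _ (posL_sorted P m x)]
  exact posL_countP_lt P m j x

lemma bisect_cntG (P : List Int) (m j : Nat) (x : Int) :
    ((posL P m x).length : Int) - ((PySem.List.bisectLeft (posL P m x) (j : Int) : Nat) : Int)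
      = cntG P m j x := by
  rw [bisectLeft_eq_countP _ _ (posL_sorted P m x)]
  exact posL_length P m j x

lemma cntG0_len (P : List Int) (m : Nat) (x : Int) :
    ((posL P m x).length : Int) = cntG P m 0 x := by
  rw [posL_len]
  unfold cntG
  exact congrArg Nat.cast (List.countP_congr (fun i _ => by simp))

lemma rc0_getD (P : List Int) (m : Nat) (x : Int) :
    ((((List.range m).map (fun (i : Nat) => (i : Int))).foldl
        (fun (d : PySem.Dict Int Int) i =>
          d.insert (PySem.List.pyGetD P i 0) (d.getD (PySem.List.pyGetD P i 0) 0 + 1))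
        PySem.Dict.empty).getD x 0)
      = cntG P m 0 x := by
  have h : (((List.range m).map (fun (i : Nat) => (i : Int))).foldl
        (fun (d : PySem.Dict Int Int) i =>
          d.insert (PySem.List.pyGetD P i 0) (d.getD (PySem.List.pyGetD P i 0) 0 + 1))
        PySem.Dict.empty)
      = ((((List.range m).map (fun (i : Nat) => (i : Int))).map (fun i => PySem.List.pyGetD P i 0)).foldl
        (fun (d : PySem.Dict Int Int) y => d.insert y (d.getD y 0 + 1)) PySem.Dict.empty) := by
    rw [List.foldl_map, List.foldl_map, List.foldl_map]
  rw [h, PySem.Dict.foldl_insert_getD_add_one_eq_counter, PySem.Dict.getD_counter]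
  unfold cntG
  rw [List.map_map, List.count_eq_countP, List.countP_map]
  exact congrArg Nat.cast (List.countP_congr (fun i _ => by simp))

lemma loop_eq (P : List Int) (total k : Int) (m : Nat) (pos : PySem.Dict Int (List Int))
    (hpos : ∀ x, pos.getD x [] = posL P m x) :
    ∀ (ds : List Int) (j : Nat) (lc rc : PySem.Dict Int Int) (a : Int),
    j + ds.length = m + 1 →
    (ds ≠ [] → ∀ x, lc.getD x 0 = cntF P m j x) →
    (ds ≠ [] → ∀ x, rc.getD x 0 = cntG P m j x) →
    ((PySem.List.enumerate ds (j : Int)).foldl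
        (fun (st : PySem.Dict Int Int × PySem.Dict Int Int × Int) p =>
          let delta := k - p.2
          let r :=
            if PySem.Int.mod (total + delta) 2 == 0 then
              max st.2.2 (st.1.getD (PySem.Int.floordiv (total + delta) 2) 0 +
                          st.2.1.getD (PySem.Int.floordiv (total - delta) 2) 0)
            else st.2.2
          let v := PySem.List.pyGetD P p.1 0
          (st.1.insert v (st.1.getD v 0 + 1), st.2.1.insert v (st.2.1.getD v 0 - 1), r))
        (lc, rc, a)).2.2
      = (PySem.List.enumerate ds (j : Int)).foldl
          (fun (best : Int) p =>
            let delta := k - p.2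
            if PySem.Int.mod (total + delta) 2 == 0 then
              let left_list := pos.getD (PySem.Int.floordiv (total + delta) 2) []
              let right_list := pos.getD (PySem.Int.floordiv (total - delta) 2) []
              let split : Int := (PySem.List.bisectLeft right_list p.1 : Int)
              max best ((PySem.List.bisectLeft left_list p.1 : Int) + (right_list.length : Int) - split)
            else best)
          a := by
  intro ds
  induction ds with
  | nil => intro j lc rc a hlen h1 h2; simp [PySem.List.enumerate]
  | cons d ds ih =>
    intro j lc rc a hlen h1 h2
    have h1' := h1 (by simp)
    have h2' := h2 (by simp)
    have hjm : j ≤ m := by simp at hlen; omega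
    rw [PySem.List.enumerate_cons, List.foldl_cons, List.foldl_cons]
    simp only [PySem.List.pyGetD_natCast]
    have hstep : (if PySem.Int.mod (total + (k - d)) 2 == 0 then
          max a (lc.getD (PySem.Int.floordiv (total + (k - d)) 2) 0 +
                 rc.getD (PySem.Int.floordiv (total - (k - d)) 2) 0)
        else a)
        = (if PySem.Int.mod (total + (k - d)) 2 == 0 then
          max a ((PySem.List.bisectLeft (pos.getD (PySem.Int.floordiv (total + (k - d)) 2) []) (j : Int) : Int) +
                 ((pos.getD (PySem.Int.floordiv (total - (k - d)) 2) []).length : Int) -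
                 (PySem.List.bisectLeft (pos.getD (PySem.Int.floordiv (total - (k - d)) 2) []) (j : Int) : Int))
        else a) := by
      by_cases hc : PySem.Int.mod (total + (k - d)) 2 == 0
      · rw [if_pos hc, if_pos hc, h1', h2', hpos, hpos,
          ← bisect_cntF P m j (PySem.Int.floordiv (total + (k - d)) 2),
          ← bisect_cntG P m j (PySem.Int.floordiv (total - (k - d)) 2)]
        ring_nf
      · rw [if_neg hc, if_neg hc]
    have hcast : (j : Int) + 1 = ((j + 1 : Nat) : Int) := by push_cast; ring
    rw [hcast]
    have hgoal := ih (j + 1)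
      (lc.insert (P.getD j 0) (lc.getD (P.getD j 0) 0 + 1))
      (rc.insert (P.getD j 0) (rc.getD (P.getD j 0) 0 - 1))
      (if PySem.Int.mod (total + (k - d)) 2 == 0 then
          max a (lc.getD (PySem.Int.floordiv (total + (k - d)) 2) 0 +
                 rc.getD (PySem.Int.floordiv (total - (k - d)) 2) 0)
        else a)
      (by simp at hlen ⊢; omega)
      (fun hne x => by
        have hjm' : j < m := by
          cases ds with
          | nil => exact absurd rfl hne
          | cons e es => simp at hlen; omega
        rw [PySem.Dict.getD_insert, cntF_succ P m j x hjm', h1' x, h1' (P.getD j 0)]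
        by_cases hx : x = P.getD j 0
        · rw [if_pos hx, if_pos (by rw [hx]), hx]
        · rw [if_neg hx, if_neg (fun h => hx h.symm)]
          ring)
      (fun hne x => by
        have hjm' : j < m := by
          cases ds with
          | nil => exact absurd rfl hne
          | cons e es => simp at hlen; omega
        rw [PySem.Dict.getD_insert, cntG_succ P m j x hjm', h2' x, h2' (P.getD j 0)]
        by_cases hx : x = P.getD j 0
        · rw [if_pos hx, if_pos (by rw [hx]), hx]
        · rw [if_neg hx, if_neg (fun h => hx h.symm)]
          ring)
    simp only at hgoal ⊢
    rw [← hstep]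
    exact hgoal

-- ===== VERDICT (by name: the statement is the Claim_ definition above) =====
theorem waysToPartition_spec : Claim_equal_waysToPartition := by
  intro nums k _ hpre
  unfold Pre_waysToPartition at hpre
  unfold Spec_waysToPartition
  obtain ⟨m, hm⟩ : ∃ m, nums.length = m + 1 :=
    ⟨nums.length - 1, by cases nums with | nil => exact absurd rfl hpre | cons a l => simp⟩
  unfold waysToPartition waysToPartition_alt pyAccumulate
  simp only [PySem.List.len_eq, hm]
  set acc := nums.foldl (fun (p : List Int × Int) x => (p.1 ++ [p.2 + x], p.2 + x)) (([] : List Int), (0:Int)) with hacc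
  have hlast : PySem.List.pyGet? acc.1 (-1) = some acc.2 := by
    rw [PySem.List.pyGet?_neg_one]
    exact acc_last nums [] 0 hpre
  rw [hlast]
  rw [show ((↑(m+1):Int) - 1) = ((m : Nat) : Int) by push_cast; ring]
  rw [PySem.List.pyRange_zero_natCast m]
  have hpos : ∀ x, ((((List.range m).map (fun (k : Nat) => (k : Int))).foldl
      (fun (d : PySem.Dict Int (List Int)) i => d.modify (PySem.List.pyGetD acc.1 i 0) [] (fun l => l ++ [i]))
      PySem.Dict.empty).getD x []) = posL acc.1 m x := by
    intro x
    rw [pos_getD (fun i => PySem.List.pyGetD acc.1 i 0)]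
    simp only [PySem.Dict.getD_empty, List.nil_append]
    rfl
  have hrc0 := rc0_getD acc.1 m
  have hbase : (if (PySem.Int.mod acc.2 2 == 0) = true then
        (((List.range m).map (fun (k : Nat) => (k : Int))).foldl
          (fun (d : PySem.Dict Int Int) i =>
            d.insert (PySem.List.pyGetD acc.1 i 0) (d.getD (PySem.List.pyGetD acc.1 i 0) 0 + 1))
          PySem.Dict.empty).getD (PySem.Int.floordiv acc.2 2) 0
      else 0)
      = (if (PySem.Int.mod acc.2 2 == 0) = true then
        (((((List.range m).map (fun (k : Nat) => (k : Int))).foldl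
          (fun (d : PySem.Dict Int (List Int)) i => d.modify (PySem.List.pyGetD acc.1 i 0) [] (fun l => l ++ [i]))
          PySem.Dict.empty).getD (PySem.Int.floordiv acc.2 2) []).length : Int)
      else 0) := by
    by_cases hc : (PySem.Int.mod acc.2 2 == 0) = true
    · rw [if_pos hc, if_pos hc, hrc0, hpos, cntG0_len]
    · rw [if_neg hc, if_neg hc]
  simp only []
  rw [hbase]
  have hloop := loop_eq acc.1 acc.2 k m _ hpos nums 0 PySem.Dict.empty
    ((((List.range m).map (fun (k : Nat) => (k : Int))).foldl
      (fun (d : PySem.Dict Int Int) i =>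
        d.insert (PySem.List.pyGetD acc.1 i 0) (d.getD (PySem.List.pyGetD acc.1 i 0) 0 + 1))
      PySem.Dict.empty))
    (if (PySem.Int.mod acc.2 2 == 0) = true then
        (((((List.range m).map (fun (k : Nat) => (k : Int))).foldl
          (fun (d : PySem.Dict Int (List Int)) i => d.modify (PySem.List.pyGetD acc.1 i 0) [] (fun l => l ++ [i]))
          PySem.Dict.empty).getD (PySem.Int.floordiv acc.2 2) []).length : Int)
      else 0)
    (by simpa using hm)
    (fun _ x => by
      rw [PySem.Dict.getD_empty]
      unfold cntF
      simp)
    (fun _ x => hrc0 x)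
  simp only [Nat.cast_zero] at hloop
  exact hloop
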